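-- pv_equiv track=rewrite | github.com/jejeong5976/coding_test | study/브루트포스/3085_사탕게임.py | count_col_max
-- ===== SOURCE A (Python) =====
-- def count_col_max(arr):
--     n,m = len(arr), len(arr[0])
--     max_count = 0
--     for j in range(m):
--         count=1
--         for i in range(1,n):
--             if arr[i][j]==arr[i-1][j]:
--                 count+=1
--             else:
--                 max_count=max(max_count,count)
--                 count=1
--         max_count=max(max_count,count)
--     return max_count
-- ===== SOURCE B (Python) =====
-- def _runs(col):
--     # run-length encoding of col: list of (value, run length)
--     out = []
--     for x in col:
--         if out and out[-1][0] == x: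
--             out[-1] = (out[-1][0], out[-1][1] + 1)
--         else:
--             out.append((x, 1))
--     return out
--
-- def count_col_max(arr):
--     n, m = len(arr), len(arr[0])
--     best = 0
--     for col in zip(*arr):
--         for _, run in _runs(col):
--             best = max(best, run)
--     return best
-- ===== Notes on version B (the rewrite author's own statement) =====
-- stated objective: alternative
-- what changed: B transposes the grid with zip(*arr) and takes the maximum over the run lengths of each column's run-length encoding, replacing A's per-column count/reset index loop.
import Mathlib
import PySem

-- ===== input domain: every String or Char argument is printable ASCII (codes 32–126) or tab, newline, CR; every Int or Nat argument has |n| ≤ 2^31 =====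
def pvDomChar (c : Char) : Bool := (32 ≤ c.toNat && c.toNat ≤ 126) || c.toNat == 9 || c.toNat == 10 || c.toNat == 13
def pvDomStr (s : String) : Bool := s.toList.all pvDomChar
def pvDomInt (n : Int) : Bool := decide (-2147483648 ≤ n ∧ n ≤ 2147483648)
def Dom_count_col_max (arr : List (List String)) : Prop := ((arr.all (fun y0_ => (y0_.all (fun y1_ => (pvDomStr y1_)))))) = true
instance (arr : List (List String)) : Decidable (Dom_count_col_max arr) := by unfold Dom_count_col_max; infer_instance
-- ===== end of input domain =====

-- B replaces A's per-column count/reset index loop by transposing the grid (zip(*arr))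
-- and taking the max over run lengths of each column's run-length encoding (objective: alternative).


-- ===== PORT A =====
-- arr[i][j]; exact whenever both indices are in range (guaranteed by Pre_ for the accesses A makes)
def pvGet2 (arr : List (List String)) (i j : Int) : String :=
  PySem.List.pyGetD (PySem.List.pyGetD arr i []) j ""

def count_col_max (arr : List (List String)) : Int :=
  match arr with
  | [] => 0  -- Python raises IndexError at arr[0]; excluded by Pre_
  | r0 :: _ =>
    let n : Int := arr.length
    let m : Int := r0.length
    (PySem.List.pyRange 0 m 1).foldl (fun max_count j =>
      let cc := (PySem.List.pyRange 1 n 1).foldl (fun (st : Int × Int) i =>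
          if pvGet2 arr i j == pvGet2 arr (i - 1) j
          then (st.1, st.2 + 1)
          else (max st.1 st.2, 1)) (max_count, 1)
      max cc.1 cc.2) 0

-- ===== PORT B =====
-- zip(*rows): columns of the grid, truncated to the shortest row (exact port of Python's zip)
def pvZipStar (rows : List (List String)) : List (List String) :=
  match rows with
  | [] => []
  | r :: _ =>
    let k := (rows.map List.length).foldl min r.length
    (List.range k).map (fun j => rows.map (fun row => row.getD j ""))

-- _runs: run-length encoding of a column (out[-1] peek/replace ported via getLast?/dropLast)
def pvRuns (col : List String) : List (String × Int) :=
  col.foldl (fun out x =>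
    match out.getLast? with
    | some (y, c) => if y == x then out.dropLast ++ [(y, c + 1)] else out ++ [(x, 1)]
    | none => [(x, 1)]) []

def count_col_max_alt (arr : List (List String)) : Int :=
  match arr with
  | [] => 0  -- len(arr[0]) raises IndexError; excluded by Pre_
  | _ :: _ =>
    (pvZipStar arr).foldl (fun best col =>
      (pvRuns col).foldl (fun b rc => max b rc.2) best) 0

-- ===== PRECONDITION & SPEC =====
-- Pre_ excludes exactly the inputs where A raises IndexError: the empty grid (arr[0]),
-- and grids with ≥ 2 rows where some later row is shorter than row 0 (arr[i][j]).
def Pre_count_col_max (arr : List (List String)) : Prop :=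
  arr ≠ [] ∧ ∀ r ∈ arr, arr.headI.length ≤ r.length
instance (arr : List (List String)) : Decidable (Pre_count_col_max arr) := by
  unfold Pre_count_col_max; infer_instance
def pvWitness_count_col_max : List (List String) := [["a", "b"], ["a", "c"], ["d", "c"]]

def Spec_count_col_max (arr : List (List String)) (out : Int) : Prop := out = count_col_max_alt arr
instance (arr : List (List String)) (out : Int) : Decidable (Spec_count_col_max arr out) := by unfold Spec_count_col_max; infer_instance

-- ===== CLAIM (what is proved, stated in full; the proofs are below) =====
def Claim_equal_count_col_max : Prop := ∀ (arr : List (List String)), Dom_count_col_max arr → Pre_count_col_max arr → Spec_count_col_max arr (count_col_max arr)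

-- ===== LEMMAS AND PROOFS =====

-- the common recursive form both inner loops reduce to: running max `mc`, current run `c`, previous value `x`
def pvChain (mc c : Int) (x : String) : List String → Int
  | [] => max mc c
  | y :: ys => if y == x then pvChain mc (c + 1) y ys else pvChain (max mc c) 1 y ys

theorem pvRuns_chain (xs : List String) (pre : List (String × Int)) (y : String) (c : Int)
    (best : Int) :
    ((xs.foldl (fun out x =>
        match out.getLast? with
        | some (y, c) => if y == x then out.dropLast ++ [(y, c + 1)] else out ++ [(x, 1)]
        | none => [(x, 1)]) (pre ++ [(y, c)])).foldl (fun b rc => max b rc.2) best)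
      = pvChain (pre.foldl (fun b rc => max b rc.2) best) c y xs := by
  induction xs generalizing pre y c with
  | nil => simp [pvChain, List.foldl_append]
  | cons z zs ih =>
    simp only [List.foldl_cons, List.getLast?_append, List.getLast?_singleton,
      Option.some_or, List.dropLast_concat]
    by_cases h : y = z
    · subst h
      simp only [beq_self_eq_true, if_pos, pvChain, ih]
    · have hb : (y == z) = false := by simp [h]
      have hb2 : (z == y) = false := by simp [Ne.symm h]
      rw [hb]
      simp only [Bool.false_eq_true, if_false, pvChain, hb2]
      rw [show (pre ++ [(y, c)]) ++ [(z, 1)] = (pre ++ [(y, c)]) ++ [(z, (1:Int))] from rfl]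
      rw [ih (pre ++ [(y, c)])]
      simp [List.foldl_append]

theorem pvPairs_chain (x : String) (xs : List String) (mc c : Int) :
    (let cc := ((x :: xs).zip xs).foldl (fun (st : Int × Int) (p : String × String) =>
        if p.2 == p.1 then (st.1, st.2 + 1) else (max st.1 st.2, 1)) (mc, c)
     max cc.1 cc.2) = pvChain mc c x xs := by
  induction xs generalizing x mc c with
  | nil => simp [pvChain]
  | cons y ys ih =>
    simp only [List.zip_cons_cons, List.foldl_cons, pvChain]
    by_cases h : (y == x) = true
    · simp only [h, if_pos, ih]
    · simp only [h, Bool.false_eq_true, if_false, ih]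


theorem pvFoldl_min_eq (l : List Nat) (a : Nat) (h : ∀ x ∈ l, a ≤ x) : l.foldl min a = a := by
  induction l with
  | nil => rfl
  | cons x xs ih =>
    simp only [List.foldl_cons, Nat.min_eq_left (h x (by simp))]
    exact ih (fun y hy => h y (by simp [hy]))

-- per-column equality: A's index loop over column j equals B's max over the runs of that column
theorem pvPerCol (r0 : List String) (rest : List (List String)) (j : Nat) (mc : Int) :
    (let cc := (PySem.List.pyRange 1 ((r0 :: rest).length : Int) 1).foldl
        (fun (st : Int × Int) i =>
          if pvGet2 (r0 :: rest) i (j : Int) == pvGet2 (r0 :: rest) (i - 1) (j : Int)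
          then (st.1, st.2 + 1) else (max st.1 st.2, 1)) (mc, 1)
     max cc.1 cc.2)
    = (pvRuns ((r0 :: rest).map (fun row => row.getD j ""))).foldl (fun b rc => max b rc.2) mc := by
  have harr : (r0 :: rest) ≠ [] := by simp
  set arr := r0 :: rest with harr_def
  set col : List String := arr.map (fun row => row.getD j "") with hcol
  set P : List (String × String) := ("", "") :: col.zip col.tail with hP
  have hcl : col.length = arr.length := by simp [hcol]
  have hzl : (col.zip col.tail).length = arr.length - 1 := by
    simp [List.length_zip, hcl]
  have hPlen : ((P.length : Nat) : Int) = (arr.length : Int) := by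
    have : arr.length ≠ 0 := by simp [harr_def]
    simp only [hP, List.length_cons, hzl]
    omega
  have hstep : ∀ (st : Int × Int), ∀ i ∈ PySem.List.pyRange 1 ((arr.length : Nat) : Int) 1,
      (fun (st : Int × Int) i =>
        if pvGet2 arr i (j : Int) == pvGet2 arr (i - 1) (j : Int)
        then (st.1, st.2 + 1) else (max st.1 st.2, 1)) st i
      = (fun (st : Int × Int) (p : String × String) =>
          if p.2 == p.1 then (st.1, st.2 + 1) else (max st.1 st.2, 1)) st
          (PySem.List.pyGetD P i ("", "")) := by
    intro st i hi
    rw [PySem.List.mem_pyRange_one] at hi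
    obtain ⟨k, hk⟩ : ∃ k, i.toNat = k + 1 := ⟨i.toNat - 1, by omega⟩
    have hkz : k < (col.zip col.tail).length := by rw [hzl]; omega
    have hPi : PySem.List.pyGetD P i ("", "") = (col.zip col.tail)[k] := by
      rw [PySem.List.pyGetD_eq_getElem P ("", "") (by omega)
        (by rw [hPlen]; omega)]
      simp only [hP, hk, List.getElem_cons_succ]
    have hcur : pvGet2 arr i (j : Int) = col[k + 1]'(by rw [hcl]; omega) := by
      unfold pvGet2
      rw [PySem.List.pyGetD_eq_getElem arr [] (by omega) (by omega),
          PySem.List.pyGetD_natCast]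
      simp [hcol, hk]
    have hprev : pvGet2 arr (i - 1) (j : Int) = col[k]'(by rw [hcl]; omega) := by
      unfold pvGet2
      rw [PySem.List.pyGetD_eq_getElem arr [] (by omega) (by omega),
          PySem.List.pyGetD_natCast]
      have : (i - 1).toNat = k := by omega
      simp [hcol, this]
    simp only [hPi, List.getElem_zip, List.getElem_tail, hcur, hprev]
  rw [show ((r0 :: rest).length : Int) = ((arr.length : Nat) : Int) from rfl]
  rw [PySem.List.foldl_congr_mem _ _ _ _ hstep]
  rw [show ((arr.length : Nat) : Int) = ((P.length : Nat) : Int) from hPlen.symm]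
  rw [PySem.List.foldl_pyRange_pyGetD' P ("", "")
      (fun (st : Int × Int) (p : String × String) =>
        if p.2 == p.1 then (st.1, st.2 + 1) else (max st.1 st.2, 1)) (mc, 1) (by norm_num)]
  have hdrop : P.drop (1 : Int).toNat = col.zip col.tail := by simp [hP]
  rw [hdrop]
  have hcc : col = (r0.getD j "") :: (rest.map (fun row => row.getD j "")) := by
    simp [hcol, harr_def]
  rw [hcc]
  rw [show ((r0.getD j "") :: rest.map (fun row => row.getD j "")).tail
      = rest.map (fun row => row.getD j "") from rfl]
  rw [pvPairs_chain]
  show _ = ((((r0.getD j "") :: rest.map (fun row => row.getD j "")).foldl _ [])).foldl _ mc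
  simp only [List.foldl_cons, List.getLast?_nil]
  exact (pvRuns_chain (rest.map (fun row => row.getD j "")) [] (r0.getD j "") 1 mc).symm

-- ===== VERDICT (by name: the statement is the Claim_ definition above) =====
theorem count_col_max_spec : Claim_equal_count_col_max := by
  intro arr _hdom hpre
  unfold Spec_count_col_max
  obtain ⟨hne, hall⟩ := hpre
  cases arr with
  | nil => exact absurd rfl hne
  | cons r0 rest =>
    have hall' : ∀ r ∈ r0 :: rest, r0.length ≤ r.length := by
      intro r hr; exact hall r hr
    unfold count_col_max count_col_max_alt pvZipStar
    simp only []
    have hmin : (((r0 :: rest).map List.length).foldl min r0.length) = r0.length :=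
      pvFoldl_min_eq _ _ (by
        intro x hx
        simp only [List.mem_map] at hx
        obtain ⟨r, hr, rfl⟩ := hx
        exact hall' r hr)
    rw [hmin]
    rw [List.foldl_map]
    rw [PySem.List.pyRange_zero_natCast]
    rw [List.foldl_map]
    exact PySem.List.foldl_congr_mem _ _ _ _ (fun mc k _hk => pvPerCol r0 rest k mc)
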